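-- pv_equiv track=rewrite | github.com/notger/advent_of_code | 2024/20_race_condition.py | parse
-- ===== SOURCE A (Python) =====
-- def parse(inp):
--     start, end, walls = None, None, set()
--     for y, line in enumerate(inp.splitlines()):
--         for x, c in enumerate(line):
--             if c == 'S':
--                 start = (x, y)
--             elif c == 'E':
--                 end = (x, y)
--             elif c == '#':
--                 walls.add((x, y))
--             else:
--                 pass
--
--     return start, end, walls
-- ===== SOURCE B (Python) =====
-- def parse(inp):
--     cells = [(c, x, y) for y, line in enumerate(inp.splitlines()) for x, c in enumerate(line)]
--     pos = {c: (x, y) for c, x, y in cells}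
--     walls = {(x, y) for c, x, y in cells if c == '#'}
--     return pos.get('S'), pos.get('E'), walls
-- ===== Notes on version B (the rewrite author's own statement) =====
-- stated objective: alternative
-- what changed: B flattens the grid into one enumerated cell list, then classifies in separate passes: a dict comprehension mapping each character to its position (looked up for 'S' and 'E') and a set comprehension for the walls, instead of A's single stateful nested loop updating three variables.
import Mathlib
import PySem

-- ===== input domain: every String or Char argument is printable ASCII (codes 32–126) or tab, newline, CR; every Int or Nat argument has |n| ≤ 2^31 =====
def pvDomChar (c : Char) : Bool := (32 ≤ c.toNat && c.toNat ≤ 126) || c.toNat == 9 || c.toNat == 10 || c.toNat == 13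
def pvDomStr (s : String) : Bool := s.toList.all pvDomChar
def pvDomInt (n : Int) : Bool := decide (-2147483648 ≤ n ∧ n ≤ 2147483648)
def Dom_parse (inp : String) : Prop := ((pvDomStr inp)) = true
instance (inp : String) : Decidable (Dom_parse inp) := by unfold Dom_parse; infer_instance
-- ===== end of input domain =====

-- B flattens the grid into one cell list and classifies in separate passes (a
-- character→position dict, then a wall filter), instead of A's single stateful
-- nested loop (objective: alternative).

-- ===== PORT A =====
-- state = (start, end, walls); inner loop body for row y
def parseStepA (y : Int)
    (st : (Option (Int × Int)) × (Option (Int × Int)) × (List (Int × Int)))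
    (xc : Int × Char) :
    (Option (Int × Int)) × (Option (Int × Int)) × (List (Int × Int)) :=
  if xc.2 == 'S' then (some (xc.1, y), st.2.1, st.2.2)
  else if xc.2 == 'E' then (st.1, some (xc.1, y), st.2.2)
  else if xc.2 == '#' then (st.1, st.2.1, PySem.Set.add st.2.2 (xc.1, y))
  else st

def parse (inp : String) : (Option (Int × Int)) × (Option (Int × Int)) × (List (Int × Int)) :=
  (PySem.List.enumerate (PySem.Str.splitlines inp)).foldl
    (fun st yl => (PySem.List.enumerate yl.2.toList).foldl (parseStepA yl.1) st)
    (none, none, [])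

-- ===== PORT B =====
def parse_alt (inp : String) : (Option (Int × Int)) × (Option (Int × Int)) × (List (Int × Int)) :=
  let cells : List (Char × Int × Int) :=
    (PySem.List.enumerate (PySem.Str.splitlines inp)).flatMap (fun yl =>
      (PySem.List.enumerate yl.2.toList).map (fun xc => (xc.2, xc.1, yl.1)))
  let pos : PySem.Dict Char (Int × Int) :=
    cells.foldl (fun d t => d.insert t.1 t.2) PySem.Dict.empty
  let walls := PySem.Set.ofList ((cells.filter (fun t => t.1 == '#')).map (·.2))
  (pos.get? 'S', pos.get? 'E', walls)

-- ===== PRECONDITION & SPEC =====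
def Spec_parse (inp : String) (out : (Option (Int × Int)) × (Option (Int × Int)) × (List (Int × Int))) : Prop := out = parse_alt inp
instance (inp : String) (out : (Option (Int × Int)) × (Option (Int × Int)) × (List (Int × Int))) : Decidable (Spec_parse inp out) := by unfold Spec_parse; infer_instance

-- ===== CLAIM (what is proved, stated in full; the proofs are below) =====
def Claim_equal_parse : Prop := ∀ (inp : String), Dom_parse inp → Spec_parse inp (parse inp)

-- ===== LEMMAS AND PROOFS =====

-- A's loop body, viewed on a flattened cell (c, x, y)
def cellStep
    (st : (Option (Int × Int)) × (Option (Int × Int)) × (List (Int × Int)))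
    (t : Char × Int × Int) :
    (Option (Int × Int)) × (Option (Int × Int)) × (List (Int × Int)) :=
  if t.1 == 'S' then (some t.2, st.2.1, st.2.2)
  else if t.1 == 'E' then (st.1, some t.2, st.2.2)
  else if t.1 == '#' then (st.1, st.2.1, PySem.Set.add st.2.2 t.2)
  else st

-- last-wins accumulator
def lastPos (c : Char) (cells : List (Char × Int × Int)) (s : Option (Int × Int)) :
    Option (Int × Int) :=
  match cells with
  | [] => s
  | t :: rest => lastPos c rest (if t.1 == c then some t.2 else s)

lemma lastPos_eq_dict (c : Char) (cells : List (Char × Int × Int))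
    (d : PySem.Dict Char (Int × Int)) :
    lastPos c cells (d.get? c) =
      (cells.foldl (fun d t => d.insert t.1 t.2) d).get? c := by
  induction cells generalizing d with
  | nil => simp [lastPos]
  | cons t rest ih =>
    have h : (if t.1 == c then some t.2 else d.get? c) = (d.insert t.1 t.2).get? c := by
      rw [PySem.Dict.get?_insert]
      by_cases hc : t.1 = c
      · simp [hc]
      · simp [hc, Ne.symm hc]
    simp only [lastPos, List.foldl_cons, h, ih]

lemma foldl_cellStep (cells : List (Char × Int × Int)) (s e : Option (Int × Int))
    (w : List (Int × Int)) :
    cells.foldl cellStep (s, e, w) =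
      (lastPos 'S' cells s, lastPos 'E' cells e,
       ((cells.filter (fun t => t.1 == '#')).map (·.2)).foldl PySem.Set.add w) := by
  induction cells generalizing s e w with
  | nil => simp [lastPos]
  | cons t rest ih =>
    by_cases hS : t.1 = 'S'
    · simp [cellStep, lastPos, hS, ih]
    · by_cases hE : t.1 = 'E'
      · simp [cellStep, lastPos, hE, ih]
      · by_cases hW : t.1 = '#'
        · simp [cellStep, lastPos, hW, ih]
        · simp [cellStep, lastPos, hS, hE, hW, ih]

-- ===== VERDICT (by name: the statement is the Claim_ definition above) =====
theorem parse_spec : Claim_equal_parse := by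
  intro inp _
  show parse inp = parse_alt inp
  unfold parse parse_alt
  have hflat :
      (PySem.List.enumerate (PySem.Str.splitlines inp)).foldl
        (fun st yl => (PySem.List.enumerate yl.2.toList).foldl (parseStepA yl.1) st)
        ((none, none, []) : (Option (Int × Int)) × (Option (Int × Int)) × (List (Int × Int))) =
      ((PySem.List.enumerate (PySem.Str.splitlines inp)).flatMap (fun yl =>
        (PySem.List.enumerate yl.2.toList).map (fun xc => (xc.2, xc.1, yl.1)))).foldl
        cellStep (none, none, []) := by
    rw [List.foldl_flatMap]
    simp only [List.foldl_map]
    rfl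
  rw [hflat, foldl_cellStep]
  have hs := lastPos_eq_dict 'S'
    ((PySem.List.enumerate (PySem.Str.splitlines inp)).flatMap (fun yl =>
      (PySem.List.enumerate yl.2.toList).map (fun xc => (xc.2, xc.1, yl.1)))) PySem.Dict.empty
  have he := lastPos_eq_dict 'E'
    ((PySem.List.enumerate (PySem.Str.splitlines inp)).flatMap (fun yl =>
      (PySem.List.enumerate yl.2.toList).map (fun xc => (xc.2, xc.1, yl.1)))) PySem.Dict.empty
  simp only [PySem.Dict.get?_empty] at hs he
  simp [hs, he, PySem.Set.ofList_eq_foldl]
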